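-- pv_equiv track=rewrite | github.com/CiaranPlusPlus/Assur-Graphs-and-Rigidity-Circuits | AssurGenerator.py | edge_combinations
-- ===== SOURCE A (Python) =====
-- import itertools
--
-- def edge_combinations(list_of_edges, list_of_nodes):
--     number_combinations = []
--     combinations = []
--     edge_count = len(list_of_edges)
--
--     # To get all useful combinations without leaving an isolate, we get the product
--     # of the list repeated for the number of edges that need to be distributed. We
--     # then check for isolated vertices and ignore these combinations as they will not
--     # result in valid Assur Graphs
--     for n in itertools.product(list_of_nodes, repeat=edge_count):
--         result = set(list_of_nodes).issubset(n)  # This makes sure there are no isolates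
--
--         if result:
--             number_combinations.append(n)
--
--     # This nested loop will create the set of edge connection combinations
--     for combo in number_combinations:
--         temp_list = []
--
--         for e, edge in enumerate(list_of_edges):
--             new_edge = combo[e], edge[1]  # create the new edge combination
--             temp_list.append(new_edge)
--
--         combinations.append(temp_list)  # add this set of combinations to the list to return
--     return combinations
-- ===== SOURCE B (Python) =====
-- def edge_combinations(list_of_edges, list_of_nodes):
--     # Recursive lexicographic generation of surjective assignments with pruning:
--     # a branch is abandoned as soon as the nodes still missing outnumber the
--     # remaining edge slots, instead of filtering the full |N|^|E| product.
--     k = len(list_of_edges)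
--
--     def rec(pos, needed):
--         if len(needed) > k - pos:
--             return []
--         if pos == k:
--             return [[]]
--         tgt = list_of_edges[pos][1]
--         out = []
--         for v in list_of_nodes:
--             for tail in rec(pos + 1, needed - {v}):
--                 out.append([(v, tgt)] + tail)
--         return out
--
--     return rec(0, set(list_of_nodes))
-- ===== Notes on version B (the rewrite author's own statement) =====
-- stated objective: faster
-- what changed: B generates the surjective assignments directly by lexicographic recursion over edge positions, pruning any branch where the nodes still missing outnumber the remaining edge slots, instead of materialising and filtering the full |N|^|E| product.
import Mathlib
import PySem

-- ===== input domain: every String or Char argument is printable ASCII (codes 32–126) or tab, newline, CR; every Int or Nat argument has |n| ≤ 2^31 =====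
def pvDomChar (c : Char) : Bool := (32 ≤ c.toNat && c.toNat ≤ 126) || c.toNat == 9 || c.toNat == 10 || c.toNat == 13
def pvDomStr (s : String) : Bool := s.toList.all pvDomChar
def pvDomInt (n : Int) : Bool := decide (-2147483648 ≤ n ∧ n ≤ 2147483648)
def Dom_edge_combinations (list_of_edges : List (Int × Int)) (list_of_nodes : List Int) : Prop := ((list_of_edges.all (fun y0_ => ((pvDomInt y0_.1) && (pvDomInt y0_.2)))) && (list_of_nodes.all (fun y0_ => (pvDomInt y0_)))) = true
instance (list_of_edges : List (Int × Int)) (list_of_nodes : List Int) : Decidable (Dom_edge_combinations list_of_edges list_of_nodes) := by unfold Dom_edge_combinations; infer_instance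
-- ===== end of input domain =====

-- B replaces A's "filter the full |N|^|E| product for surjectivity" by direct recursive
-- generation of the same assignments in the same order, pruning branches that cannot
-- become surjective (objective: faster).

-- ===== PORT A =====
-- itertools.product(list_of_nodes, repeat=k): leftmost position varies slowest
def pyProdRep (list_of_nodes : List Int) : Nat → List (List Int)
  | 0 => [[]]
  | k + 1 => list_of_nodes.flatMap (fun x => (pyProdRep list_of_nodes k).map (fun n => x :: n))

def edge_combinations (list_of_edges : List (Int × Int)) (list_of_nodes : List Int) : List (List (Int × Int)) :=
  -- first loop: keep the tuples n with set(list_of_nodes).issubset(n)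
  let number_combinations :=
    (pyProdRep list_of_nodes list_of_edges.length).filter
      (fun n => PySem.Set.issubset (PySem.Set.ofList list_of_nodes) n)
  -- second loop: 'for e, edge in enumerate(list_of_edges): temp.append((combo[e], edge[1]))';
  -- combo has exactly len(list_of_edges) entries, so pairing combo[e] with edge is zipping combo with list_of_edges
  number_combinations.map (fun combo => (combo.zip list_of_edges).map (fun p => (p.1, p.2.2)))

-- ===== PORT B =====
-- rec(pos, needed) of Source B: recursion over the remaining edges, 'needed' the set of nodes not yet used
def ecRec (list_of_nodes : List Int) : List (Int × Int) → PySem.Set Int → List (List (Int × Int))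
  | [], needed => if PySem.Set.len needed > 0 then [] else [[]]
  | e :: rest, needed =>
    if PySem.Set.len needed > rest.length + 1 then []
    else list_of_nodes.flatMap (fun v =>
      (ecRec list_of_nodes rest (PySem.Set.discard needed v)).map (fun tail => (v, e.2) :: tail))

def edge_combinations_alt (list_of_edges : List (Int × Int)) (list_of_nodes : List Int) : List (List (Int × Int)) :=
  ecRec list_of_nodes list_of_edges (PySem.Set.ofList list_of_nodes)

-- ===== PRECONDITION & SPEC =====
def Spec_edge_combinations (list_of_edges : List (Int × Int)) (list_of_nodes : List Int) (out : List (List (Int × Int))) : Prop := out = edge_combinations_alt list_of_edges list_of_nodes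
instance (list_of_edges : List (Int × Int)) (list_of_nodes : List Int) (out : List (List (Int × Int))) : Decidable (Spec_edge_combinations list_of_edges list_of_nodes out) := by unfold Spec_edge_combinations; infer_instance

-- ===== CLAIM (what is proved, stated in full; the proofs are below) =====
def Claim_equal_edge_combinations : Prop := ∀ (list_of_edges : List (Int × Int)) (list_of_nodes : List Int), Dom_edge_combinations list_of_edges list_of_nodes → Spec_edge_combinations list_of_edges list_of_nodes (edge_combinations list_of_edges list_of_nodes)

-- ===== LEMMAS AND PROOFS =====

-- every tuple of the k-fold product has length k
theorem length_mem_pyProdRep (nodes : List Int) (k : Nat) (n : List Int)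
    (h : n ∈ pyProdRep nodes k) : n.length = k := by
  induction k generalizing n with
  | zero => simp [pyProdRep] at h; simp [h]
  | succ k ih =>
    simp [pyProdRep, List.mem_flatMap, List.mem_map] at h
    obtain ⟨x, -, m, hm, rfl⟩ := h
    simp [ih m hm]

theorem nodup_subset_length_le (l1 l2 : List Int) (h : l1.Nodup) (hs : l1 ⊆ l2) :
    l1.length ≤ l2.length := by
  calc l1.length = l1.toFinset.card := (List.toFinset_card_of_nodup h).symm
    _ ≤ l2.toFinset.card := Finset.card_le_card (by intro x hx; simp at *; exact hs hx)
    _ ≤ l2.length := l2.toFinset_card_le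

-- requiring the needed set inside x :: n is requiring needed minus x inside n
theorem issubset_cons_eq (needed : List Int) (x : Int) (n : List Int) :
    PySem.Set.issubset needed (x :: n) = PySem.Set.issubset (PySem.Set.discard needed x) n := by
  apply Bool.coe_iff_coe.mp
  simp only [PySem.Set.issubset_iff, PySem.Set.mem_discard, List.mem_cons]
  constructor
  · rintro h v ⟨hv, hne⟩
    rcases h v hv with h1 | h1
    · exact absurd h1 hne
    · exact h1
  · intro h v hv
    by_cases hvx : v = x
    · exact Or.inl hvx
    · exact Or.inr (h v ⟨hv, hvx⟩)

-- if more nodes are needed than there are slots, the filter keeps nothing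
theorem filter_issubset_nil (nodes needed : List Int) (k : Nat)
    (hn : needed.Nodup) (hk : k < needed.length) :
    (pyProdRep nodes k).filter (fun n => PySem.Set.issubset needed n) = [] := by
  rw [List.filter_eq_nil_iff]
  intro n hmem hsub
  have hsub' : needed ⊆ n := by
    intro v hv
    exact (PySem.Set.issubset_iff needed n).mp hsub v hv
  have := nodup_subset_length_le needed n hn hsub'
  rw [length_mem_pyProdRep nodes k n hmem] at this
  omega

-- main invariant: the pruned recursion equals "filter the full product, then rebuild edges"
theorem ecRec_eq (nodes : List Int) (edges : List (Int × Int)) (needed : PySem.Set Int)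
    (hn : needed.Nodup) :
    ecRec nodes edges needed =
      ((pyProdRep nodes edges.length).filter (fun n => PySem.Set.issubset needed n)).map
        (fun combo => (combo.zip edges).map (fun p => (p.1, p.2.2))) := by
  induction edges generalizing needed with
  | nil =>
    by_cases hne : needed = []
    · subst hne
      simp [ecRec, pyProdRep, PySem.Set.len, PySem.Set.issubset_iff]
    · have hlen : 0 < needed.length := List.length_pos_iff.mpr hne
      rw [ecRec]
      simp only [List.length_nil]
      rw [filter_issubset_nil nodes needed 0 hn hlen]
      rw [if_pos (by simp [PySem.Set.len]; exact_mod_cast hlen)]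
      simp
  | cons e rest ih =>
    rw [ecRec]
    by_cases hbig : PySem.Set.len needed > rest.length + 1
    · rw [if_pos hbig]
      have hbig' : (e :: rest).length < needed.length := by
        simp only [PySem.Set.len] at hbig
        simp only [List.length_cons]
        exact_mod_cast hbig
      rw [filter_issubset_nil nodes needed (e :: rest).length hn hbig']
      simp
    · rw [if_neg hbig]
      show _ = ((pyProdRep nodes (rest.length + 1)).filter _).map _
      rw [pyProdRep, List.filter_flatMap, List.map_flatMap]
      apply List.flatMap_congr
      intro x _
      rw [List.filter_map, List.map_map]
      have hpred : ((fun n => PySem.Set.issubset needed n) ∘ (fun n => x :: n)) =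
          fun n => PySem.Set.issubset (PySem.Set.discard needed x) n := by
        funext n
        exact issubset_cons_eq needed x n
      rw [hpred, ih (PySem.Set.discard needed x) (hn.filter _)]
      rw [List.map_map]
      rfl

-- ===== VERDICT (by name: the statement is the Claim_ definition above) =====
theorem edge_combinations_spec : Claim_equal_edge_combinations := by
  intro list_of_edges list_of_nodes _
  show edge_combinations list_of_edges list_of_nodes = edge_combinations_alt list_of_edges list_of_nodes
  rw [edge_combinations, edge_combinations_alt,
    ecRec_eq list_of_nodes list_of_edges (PySem.Set.ofList list_of_nodes)
      (PySem.Set.nodup_ofList list_of_nodes)]
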